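-- pv_equiv track=rewrite | github.com/allysolutionsydney/orbi-backend | services/ai_provider.py | _split_system
-- ===== SOURCE A (Python) =====
-- def _split_system(messages):
--     """Anthropic keeps system prompt separate from message list."""
--     system = None
--     filtered = []
--     for m in messages:
--         if m["role"] == "system":
--             system = m["content"]
--         else:
--             # Anthropic doesn't support consecutive same-role messages
--             if filtered and filtered[-1]["role"] == m["role"]:
--                 filtered[-1]["content"] += "\n" + m["content"]
--             else:
--                 filtered.append({"role": m["role"], "content": m["content"]})
--     return system, filtered
-- ===== SOURCE B (Python) =====
-- def _split_system(messages):
--     """Anthropic keeps system prompt separate from message list."""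
--     system = None
--     rest = []
--     for m in messages:
--         if m["role"] == "system":
--             system = m["content"]
--         else:
--             rest.append((m["role"], m["content"]))
--     merged = []
--     run_role = None
--     run_content = None
--     for role, content in rest:
--         if role == run_role:
--             run_content += "\n" + content
--         else:
--             if run_role is not None:
--                 merged.append({"role": run_role, "content": run_content})
--             run_role, run_content = role, content
--     if run_role is not None:
--         merged.append({"role": run_role, "content": run_content})
--     return system, merged
-- ===== Notes on version B (the rewrite author's own statement) =====
-- stated objective: alternative
-- what changed: B works in two passes -- one scan that extracts the system prompt and collects the non-system (role, content) tuples, then a run-accumulator grouping pass that keeps the current run in local variables and flushes one fresh dict per run -- instead of A's single pass that appends dicts to its output list and mutates the content of the last one in place.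
import Mathlib
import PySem

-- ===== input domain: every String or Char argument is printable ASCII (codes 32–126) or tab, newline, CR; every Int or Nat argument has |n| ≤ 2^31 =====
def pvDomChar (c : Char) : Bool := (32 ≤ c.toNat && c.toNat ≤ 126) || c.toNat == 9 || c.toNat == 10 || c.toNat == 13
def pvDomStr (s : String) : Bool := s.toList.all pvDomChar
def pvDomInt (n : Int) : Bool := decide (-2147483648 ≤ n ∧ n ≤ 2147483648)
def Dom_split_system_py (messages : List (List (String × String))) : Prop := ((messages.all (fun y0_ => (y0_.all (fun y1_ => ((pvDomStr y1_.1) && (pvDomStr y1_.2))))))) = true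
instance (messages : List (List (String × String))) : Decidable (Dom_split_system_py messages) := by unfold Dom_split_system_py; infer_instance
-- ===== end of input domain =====

-- B: two passes (split out the system prompt and collect (role, content) tuples, then group
-- runs of equal roles with a run accumulator flushed into fresh dicts) instead of A's single
-- pass that mutates the content of the last dict of its output list in place.
-- A mutates dicts IT created in its output list, never the caller's; the equivalence is about the return value.

-- m[k] for the message dicts (first match in the association list; Pre_ excludes the missing-key KeyError)
def pvLook (k : String) (m : List (String × String)) : String := (List.lookup k m).getD ""

-- ===== PORT A =====
-- filtered[-1]["content"] += "\n" + c : update the value at key "content" in place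
def setContentA (d : List (String × String)) (c : String) : List (String × String) :=
  d.map (fun p => if p.1 == "content" then (p.1, c) else p)

def stepA (st : Option String × List (List (String × String))) (m : List (String × String)) :
    Option String × List (List (String × String)) :=
  let role := pvLook "role" m
  if role == "system" then (some (pvLook "content" m), st.2)
  else
    match st.2.getLast? with
    | some last =>
        if pvLook "role" last == role then
          (st.1, st.2.dropLast ++ [setContentA last (pvLook "content" last ++ "\n" ++ pvLook "content" m)])
        else (st.1, st.2 ++ [[("role", role), ("content", pvLook "content" m)]])
    | none => (st.1, st.2 ++ [[("role", role), ("content", pvLook "content" m)]])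

def split_system_py (messages : List (List (String × String))) : Option String × (List (List (String × String))) :=
  messages.foldl stepA (none, [])

-- ===== PORT B =====
-- first pass: system prompt (last wins) and the non-system (role, content) tuples
def stepB1 (st : Option String × List (String × String)) (m : List (String × String)) :
    Option String × List (String × String) :=
  if pvLook "role" m == "system" then (some (pvLook "content" m), st.2)
  else (st.1, st.2 ++ [(pvLook "role" m, pvLook "content" m)])

-- second pass: (merged so far, open run); 'none' is Python's run_role = None
def stepB2 (st : List (List (String × String)) × Option (String × String)) (p : String × String) :
    List (List (String × String)) × Option (String × String) :=
  match st.2 with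
  | some (rr, rc) =>
      if p.1 == rr then (st.1, some (rr, rc ++ "\n" ++ p.2))
      else (st.1 ++ [[("role", rr), ("content", rc)]], some p)
  | none => (st.1, some p)

-- final flush of the open run
def flushB (st : List (List (String × String)) × Option (String × String)) :
    List (List (String × String)) :=
  match st.2 with
  | some (rr, rc) => st.1 ++ [[("role", rr), ("content", rc)]]
  | none => st.1

def split_system_py_alt (messages : List (List (String × String))) : Option String × (List (List (String × String))) :=
  let st := messages.foldl stepB1 (none, [])
  (st.1, flushB (st.2.foldl stepB2 ([], none)))

-- ===== PRECONDITION & SPEC =====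
-- exactly where Python A returns: every message must have the "role" and "content" keys (else KeyError)
def Pre_split_system_py (messages : List (List (String × String))) : Prop :=
  ∀ m ∈ messages, (List.lookup "role" m).isSome ∧ (List.lookup "content" m).isSome

instance (messages : List (List (String × String))) : Decidable (Pre_split_system_py messages) := by
  unfold Pre_split_system_py; infer_instance

def pvWitness_split_system_py : (List (List (String × String))) :=
  [[("role", "system"), ("content", "be nice")],
   [("role", "user"), ("content", "hi")],
   [("role", "user"), ("content", "there")]]

def Spec_split_system_py (messages : List (List (String × String))) (out : Option String × (List (List (String × String)))) : Prop := out = split_system_py_alt messages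
instance (messages : List (List (String × String))) (out : Option String × (List (List (String × String)))) : Decidable (Spec_split_system_py messages out) := by unfold Spec_split_system_py; infer_instance

-- ===== CLAIM (what is proved, stated in full; the proofs are below) =====
def Claim_equal_split_system_py : Prop := ∀ (messages : List (List (String × String))), Dom_split_system_py messages → Pre_split_system_py messages → Spec_split_system_py messages (split_system_py messages)

-- ===== LEMMAS AND PROOFS =====

-- a freshly built message dict
def mkD (r c : String) : List (String × String) := [("role", r), ("content", c)]

@[simp] theorem pvLook_role_mkD (r c : String) : pvLook "role" (mkD r c) = r := by
  simp [pvLook, mkD]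

@[simp] theorem pvLook_content_mkD (r c : String) : pvLook "content" (mkD r c) = c := by
  simp [pvLook, mkD, List.lookup]

@[simp] theorem setContentA_mkD (r c c' : String) : setContentA (mkD r c) c' = mkD r c' := by
  simp [setContentA, mkD]

-- A's else-branch as a function of the (role, content) pair
def stepL (f : List (List (String × String))) (p : String × String) : List (List (String × String)) :=
  match f.getLast? with
  | some last =>
      if pvLook "role" last == p.1 then
        f.dropLast ++ [setContentA last (pvLook "content" last ++ "\n" ++ p.2)]
      else f ++ [mkD p.1 p.2]
  | none => f ++ [mkD p.1 p.2]

-- the system prompt after a scan, and the non-system (role, content) pairs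
def sysAfter (s : Option String) (msgs : List (List (String × String))) : Option String :=
  msgs.foldl (fun s m => if pvLook "role" m == "system" then some (pvLook "content" m) else s) s

def restPairs (msgs : List (List (String × String))) : List (String × String) :=
  msgs.filterMap (fun m =>
    if pvLook "role" m == "system" then none else some (pvLook "role" m, pvLook "content" m))

-- left-to-right merge with an open current run (maintained by A's loop and by B's second pass)
def loopA (r c : String) : List (String × String) → List (List (String × String))
  | [] => [mkD r c]
  | (r2, c2) :: t => if r == r2 then loopA r (c ++ "\n" ++ c2) t else mkD r c :: loopA r2 c2 t

theorem foldA_split (msgs : List (List (String × String))) :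
    ∀ (s : Option String) (f : List (List (String × String))),
    msgs.foldl stepA (s, f) = (sysAfter s msgs, (restPairs msgs).foldl stepL f) := by
  induction msgs with
  | nil => intro s f; simp [sysAfter, restPairs]
  | cons m t ih =>
      intro s f
      by_cases h : pvLook "role" m == "system"
      · have h' : pvLook "role" m = "system" := by simpa using h
        rw [List.foldl_cons, show stepA (s, f) m = (some (pvLook "content" m), f) from by
          simp [stepA, h], ih]
        simp [sysAfter, restPairs, h']
      · have h' : ¬ pvLook "role" m = "system" := by simpa using h
        rw [List.foldl_cons, show stepA (s, f) m = (s, stepL f (pvLook "role" m, pvLook "content" m)) from by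
          simp only [stepA, stepL, mkD, h, Bool.false_eq_true, if_false]
          cases f.getLast? <;> [rfl; (dsimp only; split <;> rfl)], ih]
        simp [sysAfter, restPairs, h']

theorem foldB1_split (msgs : List (List (String × String))) :
    ∀ (s : Option String) (r : List (String × String)),
    msgs.foldl stepB1 (s, r) = (sysAfter s msgs, r ++ restPairs msgs) := by
  induction msgs with
  | nil => intro s r; simp [sysAfter, restPairs]
  | cons m t ih =>
      intro s r
      by_cases h : pvLook "role" m == "system"
      · have h' : pvLook "role" m = "system" := by simpa using h
        simp [stepB1, sysAfter, restPairs, h', ih]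
      · have h' : ¬ pvLook "role" m = "system" := by simpa using h
        simp [stepB1, sysAfter, restPairs, h, h', ih]

theorem foldL_loopA (ps : List (String × String)) :
    ∀ (done : List (List (String × String))) (r c : String),
    ps.foldl stepL (done ++ [mkD r c]) = done ++ loopA r c ps := by
  induction ps with
  | nil => intro done r c; simp [loopA]
  | cons p t ih =>
      intro done r c
      obtain ⟨r2, c2⟩ := p
      by_cases h : r = r2
      · have hs : stepL (done ++ [mkD r c]) (r2, c2) = done ++ [mkD r (c ++ "\n" ++ c2)] := by
          simp [stepL, h]
        rw [List.foldl_cons, hs, ih]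
        simp [loopA, h]
      · have hs : stepL (done ++ [mkD r c]) (r2, c2) = (done ++ [mkD r c]) ++ [mkD r2 c2] := by
          simp [stepL, h]
        rw [List.foldl_cons, hs, ih]
        simp [loopA, h]

theorem foldB2_loopA (ps : List (String × String)) :
    ∀ (done : List (List (String × String))) (r c : String),
    flushB (ps.foldl stepB2 (done, some (r, c))) = done ++ loopA r c ps := by
  induction ps with
  | nil => intro done r c; simp [flushB, loopA, mkD]
  | cons p t ih =>
      intro done r c
      obtain ⟨r2, c2⟩ := p
      by_cases h : r2 = r
      · have hs : stepB2 (done, some (r, c)) (r2, c2) = (done, some (r, c ++ "\n" ++ c2)) := by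
          simp [stepB2, h]
        rw [List.foldl_cons, hs, ih]
        have h' : r = r2 := h.symm
        simp [loopA, h']
      · have hs : stepB2 (done, some (r, c)) (r2, c2) = (done ++ [mkD r c], some (r2, c2)) := by
          simp [stepB2, mkD, h]
        rw [List.foldl_cons, hs, ih]
        have h' : ¬ r = r2 := fun e => h e.symm
        simp [loopA, h']

theorem foldL_eq_foldB2 (ps : List (String × String)) :
    ps.foldl stepL [] = flushB (ps.foldl stepB2 ([], none)) := by
  cases ps with
  | nil => rfl
  | cons p t =>
      obtain ⟨r, c⟩ := p
      have hA : stepL [] (r, c) = [] ++ [mkD r c] := by simp [stepL, mkD]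
      have hB : stepB2 ([], none) (r, c) = ([], some (r, c)) := rfl
      rw [List.foldl_cons, hA, foldL_loopA t [] r c, List.foldl_cons, hB, foldB2_loopA t [] r c]

-- ===== VERDICT (by name: the statement is the Claim_ definition above) =====
theorem split_system_py_spec : Claim_equal_split_system_py := by
  intro messages _ _
  simp only [Spec_split_system_py, split_system_py, split_system_py_alt, foldA_split,
    foldB1_split, List.nil_append, foldL_eq_foldB2]
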